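-- pv_equiv track=rewrite | github.com/cagatay-softgineer/Efficiency-Analyzer | MergeCSVs.py | turn_false_if_true_on_both_sides_with_threshold
-- ===== SOURCE A (Python) =====
-- def turn_false_if_true_on_both_sides_with_threshold(arr, threshold=1):
--     result = arr.copy()
--
--     for i in range(len(arr)):
--         if not arr[i]:
--             left_side_has_true = any(arr[max(0, max(0,i-1) - threshold-1):max(0,i-1)])
--             right_side_has_true = any(arr[i+1:i + threshold + 1])
--
--             if left_side_has_true and right_side_has_true:
--                 result[i] = True
--
--     return result
-- ===== SOURCE B (Python) =====
-- def turn_false_if_true_on_both_sides_with_threshold(arr, threshold=1):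
--     # Prefix-sum of True counts: each side-window "any" becomes an O(1) range query.
--     n = len(arr)
--     prefix = [0]
--     c = 0
--     for v in arr:
--         c += 1 if v else 0
--         prefix.append(c)
--
--     def any_in(a, b):
--         # any(arr[a:b]) for a >= 0 via the prefix sums (Python slice clamping)
--         lo = a if a < n else n
--         if b < 0:
--             b += n
--             if b < 0:
--                 b = 0
--         hi = b if b < n else n
--         return prefix[hi] - prefix[lo] > 0
--
--     return [v if v else (any_in(max(0, max(0, i - 1) - threshold - 1), max(0, i - 1))
--                          and any_in(i + 1, i + threshold + 1))
--             for i, v in enumerate(arr)]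
-- ===== Notes on version B (the rewrite author's own statement) =====
-- stated objective: faster
-- what changed: Replaced the per-index slice scans (any over two windows per False cell) by a single prefix-sum pass over the booleans, so each side-window 'any' is an O(1) range query.
import Mathlib
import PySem

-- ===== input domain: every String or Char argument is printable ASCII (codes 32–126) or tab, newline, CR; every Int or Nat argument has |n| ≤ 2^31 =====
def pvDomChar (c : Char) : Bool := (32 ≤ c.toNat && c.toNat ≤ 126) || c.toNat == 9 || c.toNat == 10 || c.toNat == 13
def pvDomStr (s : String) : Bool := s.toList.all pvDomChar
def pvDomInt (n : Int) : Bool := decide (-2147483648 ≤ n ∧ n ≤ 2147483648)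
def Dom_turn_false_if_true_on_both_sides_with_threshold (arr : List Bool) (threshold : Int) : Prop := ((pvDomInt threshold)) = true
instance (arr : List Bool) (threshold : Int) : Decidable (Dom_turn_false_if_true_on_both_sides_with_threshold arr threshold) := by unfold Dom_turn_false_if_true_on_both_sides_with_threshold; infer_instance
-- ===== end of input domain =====

-- B replaces A's per-index window scans by one prefix-sum pass with O(1) range queries (asymptotically faster); return value proved identical.

-- ===== PORT A =====
def turn_false_if_true_on_both_sides_with_threshold (arr : List Bool) (threshold : Int) : List Bool :=
  (PySem.List.pyRange 0 (arr.length : Int) 1).foldl (fun result i =>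
    if !(PySem.List.pyGetD arr i false) then
      let left_side_has_true :=
        (PySem.List.slice arr (some (max 0 (max 0 (i-1) - threshold - 1))) (some (max 0 (i-1)))).any (fun b => b)
      let right_side_has_true :=
        (PySem.List.slice arr (some (i+1)) (some (i + threshold + 1))).any (fun b => b)
      if left_side_has_true && right_side_has_true then PySem.List.pySetD result i true else result
    else result) arr

-- ===== PORT B =====
-- any(arr[a:b]) for 0 ≤ a as an O(1) prefix-sum range query (Source B's any_in)
def pvAnyIn (pre : List Int) (n a b : Int) : Bool :=
  let lo : Int := if a < n then a else n
  let b' : Int := if b < 0 then (if b + n < 0 then 0 else b + n) else b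
  let hi : Int := if b' < n then b' else n
  decide (pre.getD hi.toNat 0 - pre.getD lo.toNat 0 > 0)

def turn_false_if_true_on_both_sides_with_threshold_alt (arr : List Bool) (threshold : Int) : List Bool :=
  let n : Int := arr.length
  let pre : List Int :=
    (arr.foldl (fun acc v => let c := acc.2 + (if v then 1 else 0); (acc.1 ++ [c], c))
      (([0] : List Int), (0 : Int))).1
  (PySem.List.enumerate arr).map (fun p =>
    if p.2 then p.2
    else pvAnyIn pre n (max 0 (max 0 (p.1-1) - threshold - 1)) (max 0 (p.1-1)) &&
         pvAnyIn pre n (p.1+1) (p.1 + threshold + 1))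

-- ===== PRECONDITION & SPEC =====
def Spec_turn_false_if_true_on_both_sides_with_threshold (arr : List Bool) (threshold : Int) (out : List Bool) : Prop := out = turn_false_if_true_on_both_sides_with_threshold_alt arr threshold
instance (arr : List Bool) (threshold : Int) (out : List Bool) : Decidable (Spec_turn_false_if_true_on_both_sides_with_threshold arr threshold out) := by unfold Spec_turn_false_if_true_on_both_sides_with_threshold; infer_instance

-- ===== CLAIM (what is proved, stated in full; the proofs are below) =====
def Claim_equal_turn_false_if_true_on_both_sides_with_threshold : Prop := ∀ (arr : List Bool) (threshold : Int), Dom_turn_false_if_true_on_both_sides_with_threshold arr threshold → Spec_turn_false_if_true_on_both_sides_with_threshold arr threshold (turn_false_if_true_on_both_sides_with_threshold arr threshold)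

-- ===== LEMMAS AND PROOFS =====

lemma pv_prefix_fold (arr : List Bool) : ∀ (p : List Int) (c : Int),
    (arr.foldl (fun acc v => let c := acc.2 + (if v then 1 else 0); (acc.1 ++ [c], c)) (p, c)).1
      = p ++ (List.range arr.length).map (fun k => c + ((arr.take (k+1)).countP id : Int)) := by
  induction arr with
  | nil => intro p c; simp
  | cons v t ih =>
    intro p c
    simp only [List.foldl_cons, List.length_cons, List.range_succ_eq_map]
    rw [ih]
    simp only [List.map_cons, List.map_map, List.append_assoc, List.singleton_append,
      List.take_succ_cons, List.countP_cons]
    cases v <;> simp [Function.comp_def] <;> ring_nf <;> simp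

lemma pv_prefix_getD (arr : List Bool) (k : Nat) (hk : k ≤ arr.length) :
    ((arr.foldl (fun acc v => let c := acc.2 + (if v then 1 else 0); (acc.1 ++ [c], c)) (([0] : List Int), (0 : Int))).1).getD k 0
      = ((arr.take k).countP id : Int) := by
  rw [pv_prefix_fold]
  cases k with
  | zero => simp [List.getD]
  | succ j =>
    simp only [List.getD, List.singleton_append, List.getElem?_cons_succ, List.getElem?_map,
      List.getElem?_range (by omega : j < arr.length)]
    simp

lemma pv_clamp_lo (n : Nat) (a : Int) (ha : 0 ≤ a) :
    (if a < (n:Int) then a else n).toNat = PySem.List.clampIdx n a := by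
  simp only [PySem.List.clampIdx]
  split_ifs <;> omega

lemma pv_clamp_hi (n : Nat) (b : Int) :
    (if (if b < 0 then (if b + n < 0 then 0 else b + n) else b) < (n:Int)
      then (if b < 0 then (if b + n < 0 then 0 else b + n) else b) else (n:Int)).toNat
      = PySem.List.clampIdx n b := by
  simp only [PySem.List.clampIdx]
  split_ifs <;> omega

lemma pv_seg_any (arr : List Bool) (lo hi : Nat) :
    ((arr.drop lo).take (hi - lo)).any (fun x => x)
      = decide ((((arr.take lo).countP id : Int)) < ((arr.take hi).countP id : Int)) := by
  rcases le_or_gt hi lo with h | h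
  · have h0 : hi - lo = 0 := by omega
    have hs : arr.take hi = (arr.take lo).take hi := by rw [List.take_take]; congr 1; omega
    have hle : (arr.take hi).countP id ≤ (arr.take lo).countP id := by
      rw [hs]; exact (List.take_sublist _ _).countP_le
    simp [h0]
    omega
  · have hsplit : arr.take hi = arr.take lo ++ (arr.drop lo).take (hi - lo) := by
      rw [← List.take_add]; congr 1; omega
    rw [hsplit, List.countP_append]
    cases hb : ((arr.drop lo).take (hi - lo)).any (fun x => x) with
    | false =>
      have h0 : ((arr.drop lo).take (hi - lo)).countP id = 0 := by
        rw [List.countP_eq_zero]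
        intro x hx
        simp only [List.any_eq_false] at hb
        simpa using hb x hx
      symm
      simp [h0]
    | true =>
      have hpos : 0 < ((arr.drop lo).take (hi - lo)).countP id := by
        rw [List.countP_pos_iff]
        simp only [List.any_eq_true] at hb
        obtain ⟨x, hx, hxt⟩ := hb
        exact ⟨x, hx, by simpa using hxt⟩
      symm
      simp only [decide_eq_true_iff]
      push_cast
      omega

lemma pv_anyIn_eq (arr : List Bool) (a b : Int) (ha : 0 ≤ a) :
    (PySem.List.slice arr (some a) (some b)).any (fun x => x)
      = pvAnyIn ((arr.foldl (fun acc v => let c := acc.2 + (if v then 1 else 0); (acc.1 ++ [c], c))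
          (([0] : List Int), (0 : Int))).1) (arr.length : Int) a b := by
  unfold pvAnyIn
  simp only []
  rw [pv_clamp_lo arr.length a ha, pv_clamp_hi arr.length b,
    pv_prefix_getD arr _ (PySem.List.clampIdx_le _ _),
    pv_prefix_getD arr _ (PySem.List.clampIdx_le _ _)]
  simp only [PySem.List.slice]
  rw [pv_seg_any arr (PySem.List.clampIdx arr.length a) (PySem.List.clampIdx arr.length b)]
  rw [decide_eq_decide]
  omega

def pvH (arr : List Bool) (threshold : Int) (p : Int × Bool) : Bool :=
  if p.2 then p.2
  else (PySem.List.slice arr (some (max 0 (max 0 (p.1-1) - threshold - 1))) (some (max 0 (p.1-1)))).any (fun b => b) &&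
       (PySem.List.slice arr (some (p.1+1)) (some (p.1 + threshold + 1))).any (fun b => b)

lemma pv_alt_eq_mapH (arr : List Bool) (threshold : Int) :
    turn_false_if_true_on_both_sides_with_threshold_alt arr threshold
      = (PySem.List.enumerate arr).map (pvH arr threshold) := by
  unfold turn_false_if_true_on_both_sides_with_threshold_alt pvH
  simp only []
  apply List.map_congr_left
  intro p hp
  obtain ⟨k, hk, rfl⟩ := (PySem.List.mem_enumerate_iff _ _ _).mp hp
  rw [← pv_anyIn_eq arr _ _ (by positivity), ← pv_anyIn_eq arr _ _ (by omega)]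

lemma pv_X_len (arr : List Bool) (threshold : Int) :
    ((PySem.List.enumerate arr).map (pvH arr threshold)).length = arr.length := by
  simp [PySem.List.length_enumerate]

lemma pv_X_get (arr : List Bool) (threshold : Int) (k : Nat) (hk : k < arr.length) :
    ((PySem.List.enumerate arr).map (pvH arr threshold))[k]'(by simp [PySem.List.length_enumerate, hk])
      = pvH arr threshold ((k : Int), arr[k]) := by
  rw [List.getElem_map]
  rw [PySem.List.getElem_enumerate]
  simp

lemma pv_fold_invariant (arr : List Bool) (threshold : Int) :
    ∀ (k : Nat), k ≤ arr.length →
    (PySem.List.pyRange 0 (k : Int) 1).foldl (fun result i =>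
      if !(PySem.List.pyGetD arr i false) then
        let left_side_has_true :=
          (PySem.List.slice arr (some (max 0 (max 0 (i-1) - threshold - 1))) (some (max 0 (i-1)))).any (fun b => b)
        let right_side_has_true :=
          (PySem.List.slice arr (some (i+1)) (some (i + threshold + 1))).any (fun b => b)
        if left_side_has_true && right_side_has_true then PySem.List.pySetD result i true else result
      else result) arr
    = ((PySem.List.enumerate arr).map (pvH arr threshold)).take k ++ arr.drop k := by
  intro k
  induction k with
  | zero => intro _; simp [PySem.List.pyRange_one_eq_nil]
  | succ j ih =>
    intro hj
    have hjlt : j < arr.length := by omega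
    rw [show ((j+1 : Nat) : Int) = (j : Int) + 1 by push_cast; ring,
      PySem.List.pyRange_one_succ_right (by positivity), List.foldl_append, ih (by omega)]
    simp only [List.foldl_cons, List.foldl_nil]
    have hget : PySem.List.pyGetD arr (j : Int) false = arr[j] := by
      simp [PySem.List.pyGetD_natCast, List.getD_eq_getElem?_getD, hjlt]
    set X := (PySem.List.enumerate arr).map (pvH arr threshold) with hX
    have hXj : X[j]'(by rw [pv_X_len]; omega) = pvH arr threshold ((j : Int), arr[j]) := pv_X_get arr threshold j hjlt
    have htake : X.take (j+1) = X.take j ++ [X[j]'(by rw [pv_X_len]; omega)] := by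
      rw [List.take_add_one]
      congr 1
      rw [List.getElem?_eq_getElem (by rw [pv_X_len]; omega)]
      rfl
    have hdrop : arr.drop j = arr[j] :: arr.drop (j+1) := List.drop_eq_getElem_cons hjlt
    have hlen : (X.take j).length = j := by rw [List.length_take, pv_X_len]; omega
    cases harr : arr[j] with
    | true =>
      have : pvH arr threshold ((j : Int), arr[j]) = true := by rw [harr]; simp [pvH]
      rw [hget, harr]
      simp only [Bool.not_true]
      rw [htake, hdrop, hXj, this, harr]
      simp
    | false =>
      rw [hget, harr]
      simp only [Bool.not_false, if_true]
      cases hc : ((PySem.List.slice arr (some (max 0 (max 0 ((j:Int)-1) - threshold - 1))) (some (max 0 ((j:Int)-1)))).any (fun b => b) &&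
          (PySem.List.slice arr (some ((j:Int)+1)) (some ((j:Int) + threshold + 1))).any (fun b => b)) with
      | true =>
        have hH : pvH arr threshold ((j : Int), arr[j]) = true := by
          rw [harr]; simp only [pvH]; simpa using hc
        simp only [if_true]
        rw [PySem.List.pySetD_natCast, htake, hdrop, hXj, hH]
        rw [List.set_append, hlen, if_neg (Nat.lt_irrefl j), Nat.sub_self, List.set_cons_zero]
        simp
      | false =>
        have hH : pvH arr threshold ((j : Int), arr[j]) = false := by
          rw [harr]; simp only [pvH]; simpa using hc
        simp only [Bool.false_eq_true, if_false]
        rw [htake, hdrop, hXj, hH, harr]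
        simp

theorem pv_main (arr : List Bool) (threshold : Int) :
    turn_false_if_true_on_both_sides_with_threshold arr threshold
      = turn_false_if_true_on_both_sides_with_threshold_alt arr threshold := by
  rw [pv_alt_eq_mapH]
  unfold turn_false_if_true_on_both_sides_with_threshold
  rw [pv_fold_invariant arr threshold arr.length le_rfl]
  rw [List.drop_length, List.append_nil, List.take_of_length_le (by rw [pv_X_len])]

-- ===== VERDICT (by name: the statement is the Claim_ definition above) =====
theorem turn_false_if_true_on_both_sides_with_threshold_spec : Claim_equal_turn_false_if_true_on_both_sides_with_threshold := by
  intro arr threshold _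
  unfold Spec_turn_false_if_true_on_both_sides_with_threshold
  exact pv_main arr threshold
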